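-- pv_equiv track=rewrite | github.com/DragunWF/Competitive-Programming | CodeWars/python/6_kyu/coding_meetup_9.py | is_age_diverse
-- ===== SOURCE A (Python) =====
-- def is_age_diverse(developers: list[dict]) -> bool:
--     age_groups_met = {
--         "teens": False, "twenties": False, "thirties": False, "forties": False,
--         "fifties": False, "sixties": False, "seventies": False, "eighties": False,
--         "nineties": False, "centenarian": False
--     }
--     for developer in developers:
--         age = developer["age"]
--         if age < 20:
--             age_groups_met["teens"] = True
--         elif age < 30:
--             age_groups_met["twenties"] = True
--         elif age < 40:
--             age_groups_met["thirties"] = True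
--         elif age < 50:
--             age_groups_met["forties"] = True
--         elif age < 60:
--             age_groups_met["fifties"] = True
--         elif age < 70:
--             age_groups_met["sixties"] = True
--         elif age < 80:
--             age_groups_met["seventies"] = True
--         elif age < 90:
--             age_groups_met["eighties"] = True
--         elif age < 100:
--             age_groups_met["nineties"] = True
--         else:
--             age_groups_met["centenarian"] = True
--     return all(age_groups_met.values())
-- ===== SOURCE B (Python) =====
-- def is_age_diverse(developers: list[dict]) -> bool:
--     ages = [developer["age"] for developer in developers]
--     return (any(a < 20 for a in ages)
--             and any(a >= 100 for a in ages)
--             and all(any(lo <= a < lo + 10 for a in ages)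
--                     for lo in range(20, 100, 10)))
-- ===== Notes on version B (the rewrite author's own statement) =====
-- stated objective: alternative
-- what changed: Replaces A's single pass that accumulates per-decade flags in a fixed dict via a ten-branch if/elif with demand-driven staged passes: extract the ages once, then for each of the ten decade groups test its membership condition directly with any(), combined by and/all over range(20,100,10).
import Mathlib
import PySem

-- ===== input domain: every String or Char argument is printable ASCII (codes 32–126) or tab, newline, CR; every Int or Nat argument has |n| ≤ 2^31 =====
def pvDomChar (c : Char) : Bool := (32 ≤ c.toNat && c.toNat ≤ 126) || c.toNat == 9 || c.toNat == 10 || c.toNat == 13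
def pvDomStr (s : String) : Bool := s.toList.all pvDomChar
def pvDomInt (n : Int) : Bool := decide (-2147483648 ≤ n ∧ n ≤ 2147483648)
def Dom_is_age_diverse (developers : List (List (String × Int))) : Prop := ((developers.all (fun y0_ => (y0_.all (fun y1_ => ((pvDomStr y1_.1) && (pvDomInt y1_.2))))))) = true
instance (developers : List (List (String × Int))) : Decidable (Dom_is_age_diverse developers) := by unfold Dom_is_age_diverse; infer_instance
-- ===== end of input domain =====

-- B replaces A's single accumulating pass over a fixed flag dict by staged passes:
-- extract the ages once, then check each decade group directly with any() (objective: alternative).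

-- ===== PORT A =====
-- developer["age"]: first match in the association list; the 0 default is only reached
-- on inputs excluded by Pre_ (Python raises KeyError there).
def ageOf (developer : List (String × Int)) : Int :=
  ((developer.find? (fun p => p.1 == "age")).map Prod.snd).getD 0

def agStep (d : PySem.Dict String Bool) (developer : List (String × Int)) : PySem.Dict String Bool :=
  let age : Int := ageOf developer
  if age < 20 then d.insert "teens" true
  else if age < 30 then d.insert "twenties" true
  else if age < 40 then d.insert "thirties" true
  else if age < 50 then d.insert "forties" true
  else if age < 60 then d.insert "fifties" true
  else if age < 70 then d.insert "sixties" true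
  else if age < 80 then d.insert "seventies" true
  else if age < 90 then d.insert "eighties" true
  else if age < 100 then d.insert "nineties" true
  else d.insert "centenarian" true

def is_age_diverse (developers : List (List (String × Int))) : Bool :=
  let age_groups_met : PySem.Dict String Bool := PySem.Dict.ofList
    [("teens", false), ("twenties", false), ("thirties", false), ("forties", false),
     ("fifties", false), ("sixties", false), ("seventies", false), ("eighties", false),
     ("nineties", false), ("centenarian", false)]
  ((developers.foldl agStep age_groups_met).values.all (fun v => v))

-- ===== PORT B =====
def is_age_diverse_alt (developers : List (List (String × Int))) : Bool :=
  let ages : List Int := developers.map ageOf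
  (ages.any (fun a => a < 20)) &&
  (ages.any (fun a => 100 ≤ a)) &&
  ((PySem.List.pyRange 20 100 10).all (fun lo => ages.any (fun a => lo ≤ a && a < lo + 10)))

-- ===== PRECONDITION & SPEC =====
-- Pre_ excludes exactly the inputs where some developer dict has no "age" key: both A and B raise KeyError there.
def Pre_is_age_diverse (developers : List (List (String × Int))) : Prop :=
  (developers.all (fun developer => developer.any (fun p => p.1 == "age"))) = true
instance (developers : List (List (String × Int))) : Decidable (Pre_is_age_diverse developers) := by unfold Pre_is_age_diverse; infer_instance
def pvWitness_is_age_diverse : (List (List (String × Int))) := [[("age", 25)], [("age", 101)]]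

def Spec_is_age_diverse (developers : List (List (String × Int))) (out : Bool) : Prop := out = is_age_diverse_alt developers
instance (developers : List (List (String × Int))) (out : Bool) : Decidable (Spec_is_age_diverse developers out) := by unfold Spec_is_age_diverse; infer_instance

-- ===== CLAIM (what is proved, stated in full; the proofs are below) =====
def Claim_equal_is_age_diverse : Prop := ∀ (developers : List (List (String × Int))), Dom_is_age_diverse developers → Pre_is_age_diverse developers → Spec_is_age_diverse developers (is_age_diverse developers)

-- ===== LEMMAS AND PROOFS =====

-- A's flag dict with its ten fixed keys, as a function of the ten flags.
def mkd (b1 b2 b3 b4 b5 b6 b7 b8 b9 b10 : Bool) : PySem.Dict String Bool :=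
  ⟨[("teens", b1), ("twenties", b2), ("thirties", b3), ("forties", b4),
    ("fifties", b5), ("sixties", b6), ("seventies", b7), ("eighties", b8),
    ("nineties", b9), ("centenarian", b10)]⟩

-- the decade index (1..10) A's if/elif chain selects, as a function of the age
def gIdx (developer : List (String × Int)) : Int :=
  let age : Int := ageOf developer
  if age < 20 then 1 else if age < 30 then 2 else if age < 40 then 3
  else if age < 50 then 4 else if age < 60 then 5 else if age < 70 then 6
  else if age < 80 then 7 else if age < 90 then 8 else if age < 100 then 9 else 10

lemma ins1 (b1 b2 b3 b4 b5 b6 b7 b8 b9 b10 : Bool) :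
    (mkd b1 b2 b3 b4 b5 b6 b7 b8 b9 b10).insert "teens" true = mkd true b2 b3 b4 b5 b6 b7 b8 b9 b10 := rfl
lemma ins2 (b1 b2 b3 b4 b5 b6 b7 b8 b9 b10 : Bool) :
    (mkd b1 b2 b3 b4 b5 b6 b7 b8 b9 b10).insert "twenties" true = mkd b1 true b3 b4 b5 b6 b7 b8 b9 b10 := rfl
lemma ins3 (b1 b2 b3 b4 b5 b6 b7 b8 b9 b10 : Bool) :
    (mkd b1 b2 b3 b4 b5 b6 b7 b8 b9 b10).insert "thirties" true = mkd b1 b2 true b4 b5 b6 b7 b8 b9 b10 := rfl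
lemma ins4 (b1 b2 b3 b4 b5 b6 b7 b8 b9 b10 : Bool) :
    (mkd b1 b2 b3 b4 b5 b6 b7 b8 b9 b10).insert "forties" true = mkd b1 b2 b3 true b5 b6 b7 b8 b9 b10 := rfl
lemma ins5 (b1 b2 b3 b4 b5 b6 b7 b8 b9 b10 : Bool) :
    (mkd b1 b2 b3 b4 b5 b6 b7 b8 b9 b10).insert "fifties" true = mkd b1 b2 b3 b4 true b6 b7 b8 b9 b10 := rfl
lemma ins6 (b1 b2 b3 b4 b5 b6 b7 b8 b9 b10 : Bool) :
    (mkd b1 b2 b3 b4 b5 b6 b7 b8 b9 b10).insert "sixties" true = mkd b1 b2 b3 b4 b5 true b7 b8 b9 b10 := rfl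
lemma ins7 (b1 b2 b3 b4 b5 b6 b7 b8 b9 b10 : Bool) :
    (mkd b1 b2 b3 b4 b5 b6 b7 b8 b9 b10).insert "seventies" true = mkd b1 b2 b3 b4 b5 b6 true b8 b9 b10 := rfl
lemma ins8 (b1 b2 b3 b4 b5 b6 b7 b8 b9 b10 : Bool) :
    (mkd b1 b2 b3 b4 b5 b6 b7 b8 b9 b10).insert "eighties" true = mkd b1 b2 b3 b4 b5 b6 b7 true b9 b10 := rfl
lemma ins9 (b1 b2 b3 b4 b5 b6 b7 b8 b9 b10 : Bool) :
    (mkd b1 b2 b3 b4 b5 b6 b7 b8 b9 b10).insert "nineties" true = mkd b1 b2 b3 b4 b5 b6 b7 b8 true b10 := rfl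
lemma ins10 (b1 b2 b3 b4 b5 b6 b7 b8 b9 b10 : Bool) :
    (mkd b1 b2 b3 b4 b5 b6 b7 b8 b9 b10).insert "centenarian" true = mkd b1 b2 b3 b4 b5 b6 b7 b8 b9 true := rfl

lemma agStep_eq (dd : PySem.Dict String Bool) (developer : List (String × Int)) :
    agStep dd developer =
    (if ageOf developer < 20 then dd.insert "teens" true
     else if ageOf developer < 30 then dd.insert "twenties" true
     else if ageOf developer < 40 then dd.insert "thirties" true
     else if ageOf developer < 50 then dd.insert "forties" true
     else if ageOf developer < 60 then dd.insert "fifties" true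
     else if ageOf developer < 70 then dd.insert "sixties" true
     else if ageOf developer < 80 then dd.insert "seventies" true
     else if ageOf developer < 90 then dd.insert "eighties" true
     else if ageOf developer < 100 then dd.insert "nineties" true
     else dd.insert "centenarian" true) := rfl

lemma fold_flags (l : List (List (String × Int))) (b1 b2 b3 b4 b5 b6 b7 b8 b9 b10 : Bool) :
    ((l.foldl agStep (mkd b1 b2 b3 b4 b5 b6 b7 b8 b9 b10)).values.all (fun v => v)) =
    ((b1 || l.any (fun d => gIdx d == 1)) && (b2 || l.any (fun d => gIdx d == 2)) &&
     (b3 || l.any (fun d => gIdx d == 3)) && (b4 || l.any (fun d => gIdx d == 4)) &&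
     (b5 || l.any (fun d => gIdx d == 5)) && (b6 || l.any (fun d => gIdx d == 6)) &&
     (b7 || l.any (fun d => gIdx d == 7)) && (b8 || l.any (fun d => gIdx d == 8)) &&
     (b9 || l.any (fun d => gIdx d == 9)) && (b10 || l.any (fun d => gIdx d == 10))) := by
  induction l generalizing b1 b2 b3 b4 b5 b6 b7 b8 b9 b10 with
  | nil => simp [mkd, PySem.Dict.values, Bool.and_assoc]
  | cons d t ih =>
    rw [List.foldl_cons, agStep_eq]
    split_ifs with h1 h2 h3 h4 h5 h6 h7 h8 h9
    · simp only [ins1]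
      rw [ih]
      have hg : gIdx d = 1 := by unfold gIdx; dsimp only; rw [if_pos h1]
      simp [List.any_cons, hg]
    · simp only [ins2]
      rw [ih]
      have hg : gIdx d = 2 := by unfold gIdx; dsimp only; rw [if_neg h1, if_pos h2]
      simp [List.any_cons, hg]
    · simp only [ins3]
      rw [ih]
      have hg : gIdx d = 3 := by unfold gIdx; dsimp only; rw [if_neg h1, if_neg h2, if_pos h3]
      simp [List.any_cons, hg]
    · simp only [ins4]
      rw [ih]
      have hg : gIdx d = 4 := by unfold gIdx; dsimp only; rw [if_neg h1, if_neg h2, if_neg h3, if_pos h4]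
      simp [List.any_cons, hg]
    · simp only [ins5]
      rw [ih]
      have hg : gIdx d = 5 := by unfold gIdx; dsimp only; rw [if_neg h1, if_neg h2, if_neg h3, if_neg h4, if_pos h5]
      simp [List.any_cons, hg]
    · simp only [ins6]
      rw [ih]
      have hg : gIdx d = 6 := by unfold gIdx; dsimp only; rw [if_neg h1, if_neg h2, if_neg h3, if_neg h4, if_neg h5, if_pos h6]
      simp [List.any_cons, hg]
    · simp only [ins7]
      rw [ih]
      have hg : gIdx d = 7 := by unfold gIdx; dsimp only; rw [if_neg h1, if_neg h2, if_neg h3, if_neg h4, if_neg h5, if_neg h6, if_pos h7]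
      simp [List.any_cons, hg]
    · simp only [ins8]
      rw [ih]
      have hg : gIdx d = 8 := by unfold gIdx; dsimp only; rw [if_neg h1, if_neg h2, if_neg h3, if_neg h4, if_neg h5, if_neg h6, if_neg h7, if_pos h8]
      simp [List.any_cons, hg]
    · simp only [ins9]
      rw [ih]
      have hg : gIdx d = 9 := by unfold gIdx; dsimp only; rw [if_neg h1, if_neg h2, if_neg h3, if_neg h4, if_neg h5, if_neg h6, if_neg h7, if_neg h8, if_pos h9]
      simp [List.any_cons, hg]
    · simp only [ins10]
      rw [ih]
      have hg : gIdx d = 10 := by unfold gIdx; dsimp only; rw [if_neg h1, if_neg h2, if_neg h3, if_neg h4, if_neg h5, if_neg h6, if_neg h7, if_neg h8, if_neg h9]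
      simp [List.any_cons, hg]

-- pointwise bridges between B's decade-range tests on ages and A's chain index
lemma pt1 (d : List (String × Int)) : (decide (ageOf d < 20)) = (gIdx d == (1:Int)) := by
  unfold gIdx; dsimp only; split_ifs <;> simp <;> omega
lemma pt10 (d : List (String × Int)) : (decide (100 ≤ ageOf d)) = (gIdx d == (10:Int)) := by
  unfold gIdx; dsimp only; split_ifs <;> simp <;> omega
lemma pt2 (d : List (String × Int)) : (decide ((20:Int) ≤ ageOf d) && decide (ageOf d < 20 + 10)) = (gIdx d == (2:Int)) := by
  unfold gIdx; dsimp only; split_ifs <;> simp <;> omega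
lemma pt3 (d : List (String × Int)) : (decide ((30:Int) ≤ ageOf d) && decide (ageOf d < 30 + 10)) = (gIdx d == (3:Int)) := by
  unfold gIdx; dsimp only; split_ifs <;> simp <;> omega
lemma pt4 (d : List (String × Int)) : (decide ((40:Int) ≤ ageOf d) && decide (ageOf d < 40 + 10)) = (gIdx d == (4:Int)) := by
  unfold gIdx; dsimp only; split_ifs <;> simp <;> omega
lemma pt5 (d : List (String × Int)) : (decide ((50:Int) ≤ ageOf d) && decide (ageOf d < 50 + 10)) = (gIdx d == (5:Int)) := by
  unfold gIdx; dsimp only; split_ifs <;> simp <;> omega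
lemma pt6 (d : List (String × Int)) : (decide ((60:Int) ≤ ageOf d) && decide (ageOf d < 60 + 10)) = (gIdx d == (6:Int)) := by
  unfold gIdx; dsimp only; split_ifs <;> simp <;> omega
lemma pt7 (d : List (String × Int)) : (decide ((70:Int) ≤ ageOf d) && decide (ageOf d < 70 + 10)) = (gIdx d == (7:Int)) := by
  unfold gIdx; dsimp only; split_ifs <;> simp <;> omega
lemma pt8 (d : List (String × Int)) : (decide ((80:Int) ≤ ageOf d) && decide (ageOf d < 80 + 10)) = (gIdx d == (8:Int)) := by
  unfold gIdx; dsimp only; split_ifs <;> simp <;> omega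
lemma pt9 (d : List (String × Int)) : (decide ((90:Int) ≤ ageOf d) && decide (ageOf d < 90 + 10)) = (gIdx d == (9:Int)) := by
  unfold gIdx; dsimp only; split_ifs <;> simp <;> omega

-- ===== VERDICT (by name: the statement is the Claim_ definition above) =====
theorem is_age_diverse_spec : Claim_equal_is_age_diverse := by
  intro developers _ _
  unfold Spec_is_age_diverse is_age_diverse is_age_diverse_alt
  dsimp only
  rw [show (PySem.Dict.ofList
    [("teens", false), ("twenties", false), ("thirties", false), ("forties", false),
     ("fifties", false), ("sixties", false), ("seventies", false), ("eighties", false),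
     ("nineties", false), ("centenarian", false)] : PySem.Dict String Bool) =
    mkd false false false false false false false false false false from rfl]
  rw [fold_flags]
  rw [show PySem.List.pyRange 20 100 10 = ([20,30,40,50,60,70,80,90] : List Int) from by decide]
  simp only [List.all_cons, List.all_nil, List.any_map, Function.comp_def,
             Bool.false_or, Bool.and_true]
  rw [funext pt1, funext pt10, funext pt2, funext pt3, funext pt4, funext pt5,
      funext pt6, funext pt7, funext pt8, funext pt9]
  cases developers.any (fun d => gIdx d == (1:Int)) <;>
  cases developers.any (fun d => gIdx d == (2:Int)) <;>
  cases developers.any (fun d => gIdx d == (3:Int)) <;>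
  cases developers.any (fun d => gIdx d == (4:Int)) <;>
  cases developers.any (fun d => gIdx d == (5:Int)) <;>
  cases developers.any (fun d => gIdx d == (6:Int)) <;>
  cases developers.any (fun d => gIdx d == (7:Int)) <;>
  cases developers.any (fun d => gIdx d == (8:Int)) <;>
  cases developers.any (fun d => gIdx d == (9:Int)) <;>
  cases developers.any (fun d => gIdx d == (10:Int)) <;> rfl
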